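-- pv_equiv track=rewrite | github.com/materasu/Hackerrank-Codes | Special Multiple/specialMultiple.py | make_numbers
-- ===== SOURCE A (Python) =====
-- def make_numbers(n, numbers, digit_count, DIGIT_UPPER_LIMIT):
--     if(digit_count >= DIGIT_UPPER_LIMIT):
--         return numbers
--     else:
--         n *= 10
--         numbers.append(n)
--         numbers = make_numbers(n, numbers, digit_count+1, DIGIT_UPPER_LIMIT)
--         n += 9
--         numbers.append(n)
--         numbers = make_numbers(n, numbers, digit_count+1, DIGIT_UPPER_LIMIT)
--         return numbers
-- ===== SOURCE B (Python) =====
-- def make_numbers(n, numbers, digit_count, DIGIT_UPPER_LIMIT):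
--     # iterative preorder traversal with an explicit stack instead of recursion;
--     # mutates and returns the same `numbers` list, like the original
--     stack = [(n, digit_count, False)]
--     while stack:
--         v, dc, app = stack.pop()
--         if app:
--             numbers.append(v)
--         if dc < DIGIT_UPPER_LIMIT:
--             stack.append((v * 10 + 9, dc + 1, True))
--             stack.append((v * 10, dc + 1, True))
--     return numbers
-- ===== Notes on version B (the rewrite author's own statement) =====
-- stated objective: alternative
-- what changed: Replaces the double self-recursion with an iterative preorder traversal driven by an explicit stack of (value, depth, emit) frames.
import Mathlib
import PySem

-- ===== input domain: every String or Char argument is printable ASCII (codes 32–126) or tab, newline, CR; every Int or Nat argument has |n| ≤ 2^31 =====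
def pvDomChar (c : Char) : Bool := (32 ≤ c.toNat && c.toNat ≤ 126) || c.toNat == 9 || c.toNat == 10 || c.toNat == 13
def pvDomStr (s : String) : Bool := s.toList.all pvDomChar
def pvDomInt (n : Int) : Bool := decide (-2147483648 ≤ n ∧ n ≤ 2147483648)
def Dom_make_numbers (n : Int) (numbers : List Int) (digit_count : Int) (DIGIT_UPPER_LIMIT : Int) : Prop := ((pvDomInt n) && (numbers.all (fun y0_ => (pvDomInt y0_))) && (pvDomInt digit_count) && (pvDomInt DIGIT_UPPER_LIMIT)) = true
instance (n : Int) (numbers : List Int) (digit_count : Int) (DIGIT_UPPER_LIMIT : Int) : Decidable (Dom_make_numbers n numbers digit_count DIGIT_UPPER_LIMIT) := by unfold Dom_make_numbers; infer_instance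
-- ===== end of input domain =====

-- B replaces A's double self-recursion by an explicit-stack iterative preorder traversal
-- (alternative decomposition, same cost); both mutate the passed list in place the same way,
-- the theorem is about the returned value.


-- ===== PORT A =====
-- A's recursion, rendered with a structural fuel = (DIGIT_UPPER_LIMIT - digit_count).toNat,
-- which is exactly A's recursion depth (fuel = 0 ↔ digit_count >= DIGIT_UPPER_LIMIT);
-- the fuel is only the totality device, the computation is A's line for line.
def make_numbersGo (fuel : Nat) (n : Int) (numbers : List Int) (digit_count : Int) (DIGIT_UPPER_LIMIT : Int) : List Int :=
  match fuel with
  | 0 => numbers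
  | fuel + 1 =>
    let n1 := n * 10
    let numbers1 := numbers ++ [n1]
    let numbers2 := make_numbersGo fuel n1 numbers1 (digit_count + 1) DIGIT_UPPER_LIMIT
    let n2 := n1 + 9
    let numbers3 := numbers2 ++ [n2]
    make_numbersGo fuel n2 numbers3 (digit_count + 1) DIGIT_UPPER_LIMIT

def make_numbers (n : Int) (numbers : List Int) (digit_count : Int) (DIGIT_UPPER_LIMIT : Int) : List Int :=
  make_numbersGo (DIGIT_UPPER_LIMIT - digit_count).toNat n numbers digit_count DIGIT_UPPER_LIMIT

-- ===== PORT B =====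
-- the while-loop of Source B; the Lean list plays the Python stack (head = top); the structural
-- fuel is the exact number of loop iterations left (each frame at depth dc costs
-- 2^((limit-dc).toNat+1) - 1 pops), only a totality device.
def altFrameFuel (limit : Int) (e : Int × Int × Bool) : Nat := 2 ^ ((limit - e.2.1).toNat + 1) - 1

def make_numbers_altLoop (limit : Int) (fuel : Nat) (numbers : List Int) (stack : List (Int × Int × Bool)) : List Int :=
  match stack with
  | [] => numbers
  | (v, dc, app) :: rest =>
    match fuel with
    | 0 => numbers
    | fuel + 1 =>
      let numbers' := if app then numbers ++ [v] else numbers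
      if dc < limit then
        make_numbers_altLoop limit fuel numbers' ((v * 10, dc + 1, true) :: (v * 10 + 9, dc + 1, true) :: rest)
      else
        make_numbers_altLoop limit fuel numbers' rest

def make_numbers_alt (n : Int) (numbers : List Int) (digit_count : Int) (DIGIT_UPPER_LIMIT : Int) : List Int :=
  make_numbers_altLoop DIGIT_UPPER_LIMIT (altFrameFuel DIGIT_UPPER_LIMIT (n, digit_count, false)) numbers [(n, digit_count, false)]

-- ===== PRECONDITION & SPEC =====
-- Pre_ excludes calls whose recursion depth DIGIT_UPPER_LIMIT - digit_count exceeds 900: on every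
-- such input Python A raises (RecursionError once the depth reaches the interpreter's ~1000-frame
-- limit, MemoryError below that, since the result would need at least 2^900 list elements);
-- A returns no value anywhere outside Pre_.
def Pre_make_numbers (n : Int) (numbers : List Int) (digit_count : Int) (DIGIT_UPPER_LIMIT : Int) : Prop :=
  DIGIT_UPPER_LIMIT - digit_count ≤ 900
instance (n : Int) (numbers : List Int) (digit_count : Int) (DIGIT_UPPER_LIMIT : Int) : Decidable (Pre_make_numbers n numbers digit_count DIGIT_UPPER_LIMIT) := by unfold Pre_make_numbers; infer_instance
def pvWitness_make_numbers : Int × List Int × Int × Int := (1, [5], 0, 3)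
def Spec_make_numbers (n : Int) (numbers : List Int) (digit_count : Int) (DIGIT_UPPER_LIMIT : Int) (out : List Int) : Prop := out = make_numbers_alt n numbers digit_count DIGIT_UPPER_LIMIT
instance (n : Int) (numbers : List Int) (digit_count : Int) (DIGIT_UPPER_LIMIT : Int) (out : List Int) : Decidable (Spec_make_numbers n numbers digit_count DIGIT_UPPER_LIMIT out) := by unfold Spec_make_numbers; infer_instance

-- ===== CLAIM (what is proved, stated in full; the proofs are below) =====
def Claim_equal_make_numbers : Prop := ∀ (n : Int) (numbers : List Int) (digit_count : Int) (DIGIT_UPPER_LIMIT : Int), Dom_make_numbers n numbers digit_count DIGIT_UPPER_LIMIT → Pre_make_numbers n numbers digit_count DIGIT_UPPER_LIMIT → Spec_make_numbers n numbers digit_count DIGIT_UPPER_LIMIT (make_numbers n numbers digit_count DIGIT_UPPER_LIMIT)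

-- ===== LEMMAS AND PROOFS =====

-- A's accumulator can be pulled out front
lemma make_numbersGo_acc : ∀ (fuel : Nat) (n : Int) (numbers : List Int) (dc L : Int),
    make_numbersGo fuel n numbers dc L = numbers ++ make_numbersGo fuel n [] dc L := by
  intro fuel
  induction fuel with
  | zero => intro n numbers dc L; simp [make_numbersGo]
  | succ k ih =>
    intro n numbers dc L
    simp only [make_numbersGo]
    rw [ih (n * 10) (numbers ++ [n * 10]), ih (n * 10) ([] ++ [n * 10])]
    rw [ih (n * 10 + 9) (numbers ++ [n * 10] ++ make_numbersGo k (n * 10) [] (dc + 1) L ++ [n * 10 + 9]),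
        ih (n * 10 + 9) ([] ++ [n * 10] ++ make_numbersGo k (n * 10) [] (dc + 1) L ++ [n * 10 + 9])]
    simp [List.append_assoc]

-- the total fuel a stack still needs
def stackFuel (limit : Int) (stack : List (Int × Int × Bool)) : Nat :=
  (stack.map (altFrameFuel limit)).sum

-- contribution of one stack frame to the output
def frameOut (L : Int) (e : Int × Int × Bool) : List Int :=
  (if e.2.2 then [e.1] else []) ++ make_numbersGo (L - e.2.1).toNat e.1 [] e.2.1 L

lemma altFrameFuel_pos (limit : Int) (e : Int × Int × Bool) : 1 ≤ altFrameFuel limit e := by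
  have h : 1 ≤ 2 ^ ((limit - e.2.1).toNat + 1) := Nat.one_le_two_pow
  have h2 : (2:Nat) ^ ((limit - e.2.1).toNat + 1) = 2 * 2 ^ (limit - e.2.1).toNat := by
    rw [pow_succ]; ring
  have h3 : 1 ≤ 2 ^ (limit - e.2.1).toNat := Nat.one_le_two_pow
  unfold altFrameFuel
  omega

lemma altLoop_spec (limit : Int) : ∀ (fuel : Nat) (numbers : List Int) (stack : List (Int × Int × Bool)),
    stackFuel limit stack ≤ fuel →
    make_numbers_altLoop limit fuel numbers stack = numbers ++ stack.flatMap (frameOut limit) := by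
  intro fuel
  induction fuel with
  | zero =>
    intro numbers stack hf
    match stack with
    | [] => simp [make_numbers_altLoop]
    | e :: rest =>
      exfalso
      have h1 := altFrameFuel_pos limit e
      simp [stackFuel, List.map_cons, List.sum_cons] at hf
      omega
  | succ f ih =>
    intro numbers stack hf
    match stack with
    | [] => simp [make_numbers_altLoop]
    | (v, dc, app) :: rest =>
      simp only [make_numbers_altLoop]
      by_cases hdc : dc < limit
      · -- frame splits into two children
        have hk : (limit - dc).toNat = (limit - (dc + 1)).toNat + 1 := by omega
        have hfuel : altFrameFuel limit (v, dc, app)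
            = altFrameFuel limit (v * 10, dc + 1, true) + altFrameFuel limit (v * 10 + 9, dc + 1, true) + 1 := by
          simp only [altFrameFuel, hk]
          have h3 : 1 ≤ (2:Nat) ^ ((limit - (dc + 1)).toNat + 1) := Nat.one_le_two_pow
          have h2 : (2:Nat) ^ ((limit - (dc + 1)).toNat + 1 + 1) = 2 * 2 ^ ((limit - (dc + 1)).toNat + 1) := by
            rw [pow_succ]; ring
          omega
        have hle : stackFuel limit ((v * 10, dc + 1, true) :: (v * 10 + 9, dc + 1, true) :: rest) ≤ f := by
          simp only [stackFuel, List.map_cons, List.sum_cons] at hf ⊢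
          omega
        rw [if_pos hdc, ih _ _ hle]
        have hexp : make_numbersGo ((limit - dc).toNat) v [] dc limit
            = [v * 10] ++ make_numbersGo ((limit - (dc + 1)).toNat) (v * 10) [] (dc + 1) limit
              ++ [v * 10 + 9] ++ make_numbersGo ((limit - (dc + 1)).toNat) (v * 10 + 9) [] (dc + 1) limit := by
          rw [hk]
          simp only [make_numbersGo]
          rw [make_numbersGo_acc _ (v * 10) ([] ++ [v * 10]),
              make_numbersGo_acc _ (v * 10 + 9) ([] ++ [v * 10] ++ make_numbersGo ((limit - (dc + 1)).toNat) (v * 10) [] (dc + 1) limit ++ [v * 10 + 9])]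
          simp [List.append_assoc]
        simp only [List.flatMap_cons, frameOut, hexp]
        cases app <;> simp [List.append_assoc]
      · -- leaf frame
        have hle : stackFuel limit rest ≤ f := by
          have h1 := altFrameFuel_pos limit (v, dc, app)
          simp only [stackFuel, List.map_cons, List.sum_cons] at hf ⊢
          omega
        rw [if_neg hdc, ih _ _ hle]
        have h0 : (limit - dc).toNat = 0 := by omega
        have hnil : make_numbersGo ((limit - dc).toNat) v [] dc limit = [] := by
          rw [h0]; simp [make_numbersGo]
        simp only [List.flatMap_cons, frameOut, hnil]
        cases app <;> simp

-- ===== VERDICT (by name: the statement is the Claim_ definition above) =====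
theorem make_numbers_spec : Claim_equal_make_numbers := by
  intro n numbers dc L _ _
  show make_numbers n numbers dc L = make_numbers_alt n numbers dc L
  rw [make_numbers_alt, altLoop_spec L _ _ _ (by simp [stackFuel])]
  simp only [List.flatMap_cons, List.flatMap_nil, frameOut, List.append_nil]
  rw [make_numbers, make_numbersGo_acc _ n numbers]; simp
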